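-- pv_equiv track=rewrite | github.com/samcharles93/mantle | scripts/gen_model_spec.py | choose_primary_prefix
-- ===== SOURCE A (Python) =====
-- def choose_primary_prefix(prefixes, names):
--     # Prefer language_model.* if present, then largest layer count.
--     best = None
--     best_count = -1
--     for prefix, layers in prefixes.items():
--         count = len(layers)
--         if "language_model" in prefix:
--             if count > best_count or (best and "language_model" not in best):
--                 best = prefix
--                 best_count = count
--             continue
--         if best is None or (count > best_count and "language_model" not in best):
--             best = prefix
--             best_count = count
--     if best is None:
--         return None, None
--     return best, best_count
-- ===== SOURCE B (Python) =====
-- def choose_primary_prefix(prefixes, names):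
--     # Prefer language_model.* if present, then largest layer count (first wins on ties).
--     items = list(prefixes.items())
--     lm = [kv for kv in items if "language_model" in kv[0]]
--     pool = lm if lm else items
--     if not pool:
--         return None, None
--     prefix, layers = max(pool, key=lambda kv: len(kv[1]))
--     return prefix, len(layers)
-- ===== Notes on version B (the rewrite author's own statement) =====
-- stated objective: simpler
-- what changed: Replaces A's single stateful loop with its tangle of best/best_count flags by a two-line partition: take the language_model group if non-empty (else all items) and return its first maximal entry by layer count via max(key=...).
-- intended difference: On inputs where the empty-string prefix is the first layer-count maximum among the entries before the first language_model prefix and that language_model prefix has no more layers, A's truthiness test `best and ...` treats the empty-string best like None and returns the empty (or a later, smaller) prefix, while B returns the first-maximal language_model prefix, which is what A's own comment ('Prefer language_model.*') intends. — e.g. on choose_primary_prefix([("", ["a"]), ("language_model.m", [])], []): A returns (some "", some 1), B returns (some "language_model.m", some 0)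
import Mathlib
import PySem

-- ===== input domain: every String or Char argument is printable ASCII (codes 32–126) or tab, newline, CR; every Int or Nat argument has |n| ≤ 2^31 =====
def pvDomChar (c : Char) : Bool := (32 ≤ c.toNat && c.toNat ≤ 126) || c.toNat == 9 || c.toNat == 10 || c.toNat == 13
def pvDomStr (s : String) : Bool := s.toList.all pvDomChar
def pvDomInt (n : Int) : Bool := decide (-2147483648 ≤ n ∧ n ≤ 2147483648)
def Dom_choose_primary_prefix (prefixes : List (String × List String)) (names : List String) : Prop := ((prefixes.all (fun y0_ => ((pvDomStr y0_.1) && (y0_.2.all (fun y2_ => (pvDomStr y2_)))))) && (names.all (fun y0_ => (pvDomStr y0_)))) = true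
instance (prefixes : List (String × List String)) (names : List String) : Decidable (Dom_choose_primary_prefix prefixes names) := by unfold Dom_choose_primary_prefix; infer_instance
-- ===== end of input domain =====

-- B replaces A's stateful best/best_count loop by partition + max(key=len); return-value equivalence
-- proved outside D_ (the empty-string-prefix truthiness corner, stated below); objective: simpler.

-- ===== PORT A =====
-- "language_model" in s
def pvLm (s : String) : Bool := PySem.Str.isIn "language_model" s
-- Python truthiness of `best` (None and "" are falsy)
def pvTruthy : Option String → Bool
  | none => false
  | some s => !(s == "")
-- `"language_model" in best` (only reached when best is not None)
def pvLmOpt : Option String → Bool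
  | none => false
  | some b => pvLm b

-- one iteration of A's for-loop, state = (best, best_count)
def pvStepA (st : Option String × Int) (kv : String × List String) : Option String × Int :=
  let count : Int := kv.2.length
  if pvLm kv.1 then
    if decide (count > st.2) || (pvTruthy st.1 && !pvLmOpt st.1) then (some kv.1, count) else st
  else
    if st.1.isNone || (decide (count > st.2) && !pvLmOpt st.1) then (some kv.1, count) else st

def choose_primary_prefix (prefixes : List (String × List String)) (names : List String) : Option String × Option Int :=
  let r := prefixes.foldl pvStepA (none, -1)
  match r.1 with
  | none => (none, none)
  | some b => (some b, some r.2)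

-- ===== PORT B =====
def choose_primary_prefix_alt (prefixes : List (String × List String)) (names : List String) : Option String × Option Int :=
  let lm := prefixes.filter (fun kv => pvLm kv.1)
  let pool := if lm.isEmpty then prefixes else lm
  match PySem.List.max? pool (fun kv => kv.2.length) with
  | none => (none, none)
  | some kv => (some kv.1, some (kv.2.length : Int))

-- ===== PRECONDITION & SPEC =====
-- Pre_ restricts prefixes to a genuine dict: keys are distinct (a Python dict cannot present
-- duplicate keys, so no Python input is excluded).
def Pre_choose_primary_prefix (prefixes : List (String × List String)) (names : List String) : Prop :=
  (prefixes.map Prod.fst).Nodup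
instance (prefixes : List (String × List String)) (names : List String) : Decidable (Pre_choose_primary_prefix prefixes names) := by unfold Pre_choose_primary_prefix; infer_instance
def pvWitness_choose_primary_prefix : (List (String × List String)) × List String :=
  ([("model", ["a"]), ("language_model.m", ["b", "c"])], [])

-- D_-side view of the input, stated via the library substring relation (independent of the ports):
-- pvLmN: the entry's prefix contains "language_model"
def pvLmN (kv : String × List String) : Bool := decide ("language_model".toList <:+: kv.1.toList)
-- the entries before / from the first language_model prefix
def pvDSeg (l : List (String × List String)) : List (String × List String) :=
  l.takeWhile (fun kv => !pvLmN kv)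
def pvDSuf (l : List (String × List String)) : List (String × List String) :=
  l.dropWhile (fun kv => !pvLmN kv)
def pvD0 : String × List String := ("", [])

-- after the skipped first language_model entry (layer counts s0len, threshold c = the empty
-- prefix's count): true iff A never recovers the language_model preference
def pvDiffTailB (rest : List (String × List String)) (s0len c : Nat) : Bool :=
  match rest.dropWhile (fun kv => kv.2.length ≤ c) with
  | [] => true
  | rj :: tail =>
    if pvLmN rj then false
    else
      match tail.dropWhile (fun kv => !pvLmN kv) with
      | [] => true
      | rk :: t2 =>
        let small := rest.takeWhile (fun kv => kv.2.length ≤ c)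
        let mb := (small.filter (fun kv => pvLmN kv)).foldl (fun m kv => max m kv.2.length) s0len
        let mp := (t2.filter (fun kv => pvLmN kv)).foldl (fun m kv => max m kv.2.length) rk.2.length
        decide (mp ≤ mb)

-- On dict inputs where the empty-string prefix is the first layer-count maximum of the entries
-- before the first language_model prefix, that language_model prefix has no more layers, and no
-- later entry lets A recover (pvDiffTailB), A's truthiness test `best and ...` treats the
-- empty-string best like None: A returns the empty prefix or a stale non-language_model / later
-- language_model entry, while B returns the first-maximal language_model prefix, as A's own
-- comment ('Prefer language_model.*') intends.
def D_choose_primary_prefix (prefixes : List (String × List String)) (names : List String) : Prop :=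
  pvDSuf prefixes ≠ [] ∧
  ∃ i ∈ List.range (pvDSeg prefixes).length,
    ((pvDSeg prefixes).getD i pvD0).1 = "" ∧
    (∀ j ∈ List.range (pvDSeg prefixes).length,
      (j < i → ((pvDSeg prefixes).getD j pvD0).2.length < ((pvDSeg prefixes).getD i pvD0).2.length) ∧
      (i < j → ((pvDSeg prefixes).getD j pvD0).2.length ≤ ((pvDSeg prefixes).getD i pvD0).2.length)) ∧
    ((pvDSuf prefixes).headD pvD0).2.length ≤ ((pvDSeg prefixes).getD i pvD0).2.length ∧
    pvDiffTailB ((pvDSuf prefixes).tail) (((pvDSuf prefixes).headD pvD0).2.length)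
      (((pvDSeg prefixes).getD i pvD0).2.length) = true

instance (prefixes : List (String × List String)) (names : List String) : Decidable (D_choose_primary_prefix prefixes names) := by
  unfold D_choose_primary_prefix; infer_instance

def Spec_choose_primary_prefix (prefixes : List (String × List String)) (names : List String) (out : Option String × Option Int) : Prop := ¬ D_choose_primary_prefix prefixes names → out = choose_primary_prefix_alt prefixes names
instance (prefixes : List (String × List String)) (names : List String) (out : Option String × Option Int) : Decidable (Spec_choose_primary_prefix prefixes names out) := by unfold Spec_choose_primary_prefix; infer_instance

def pvDiffWitness_choose_primary_prefix : (List (String × List String)) × List String :=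
  ([("", ["a"]), ("language_model.m", [])], [])
def pvDiffWitnessOut_choose_primary_prefix : (Option String × Option Int) × (Option String × Option Int) :=
  ((some "", some 1), (some "language_model.m", some 0))

-- ===== CLAIM =====
def Claim_unchanged_choose_primary_prefix : Prop := ∀ (prefixes : List (String × List String)) (names : List String), Dom_choose_primary_prefix prefixes names → Pre_choose_primary_prefix prefixes names → Spec_choose_primary_prefix prefixes names (choose_primary_prefix prefixes names)
def Claim_changed_choose_primary_prefix : Prop := Dom_choose_primary_prefix (pvDiffWitness_choose_primary_prefix.1) (pvDiffWitness_choose_primary_prefix.2) ∧ Pre_choose_primary_prefix (pvDiffWitness_choose_primary_prefix.1) (pvDiffWitness_choose_primary_prefix.2) ∧ D_choose_primary_prefix (pvDiffWitness_choose_primary_prefix.1) (pvDiffWitness_choose_primary_prefix.2) ∧ choose_primary_prefix (pvDiffWitness_choose_primary_prefix.1) (pvDiffWitness_choose_primary_prefix.2) = pvDiffWitnessOut_choose_primary_prefix.1 ∧ choose_primary_prefix_alt (pvDiffWitness_choose_primary_prefix.1) (pvDiffWitness_choose_primary_prefix.2) = pvDiffWitnessOut_choose_primary_prefix.2 ∧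 pvDiffWitnessOut_choose_primary_prefix.1 ≠ pvDiffWitnessOut_choose_primary_prefix.2
def Claim_exact_choose_primary_prefix : Prop := ∀ (prefixes : List (String × List String)) (names : List String), Dom_choose_primary_prefix prefixes names → Pre_choose_primary_prefix prefixes names → D_choose_primary_prefix prefixes names → choose_primary_prefix prefixes names ≠ choose_primary_prefix_alt prefixes names

-- ===== LEMMAS AND PROOFS =====

-- proof-side segment views in terms of the ports' pvLm, and the bridge to D_'s formulation
def pvPreSeg (l : List (String × List String)) : List (String × List String) :=
  l.takeWhile (fun kv => !pvLm kv.1)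
def pvSufSeg (l : List (String × List String)) : List (String × List String) :=
  l.dropWhile (fun kv => !pvLm kv.1)

theorem pvLm_eq_decide (s : String) : pvLm s = decide ("language_model".toList <:+: s.toList) := by
  cases hb : PySem.Str.isIn "language_model" s
  · rw [pvLm, hb]
    symm
    rw [decide_eq_false_iff_not]
    intro hin
    rw [← PySem.Str.isIn_iff_infix, hb] at hin
    cases hin
  · rw [pvLm, hb]
    symm
    rw [decide_eq_true_eq]
    exact (PySem.Str.isIn_iff_infix _ _).mp hb

theorem pvLmN_eq (kv : String × List String) : pvLmN kv = pvLm kv.1 := (pvLm_eq_decide kv.1).symm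

theorem pvDSeg_eq (l : List (String × List String)) : pvDSeg l = pvPreSeg l := by
  unfold pvDSeg pvPreSeg
  congr 1
  funext kv
  rw [pvLmN_eq]

theorem pvDSuf_eq (l : List (String × List String)) : pvDSuf l = pvSufSeg l := by
  unfold pvDSuf pvSufSeg
  congr 1
  funext kv
  rw [pvLmN_eq]

-- pvSmax: running first-maximum of (key, layer-count), the common currency of both ports
def pvSmax (p : String × Int) (kv : String × List String) : String × Int :=
  if (kv.2.length : Int) > p.2 then (kv.1, (kv.2.length : Int)) else p

theorem pvSmax_def (p : String × Int) (kv : String × List String) :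
    pvSmax p kv = if (kv.2.length : Int) > p.2 then (kv.1, (kv.2.length : Int)) else p := rfl

def pvM2 (m : String × List String) (x : String × List String) : String × List String :=
  if m.2.length < x.2.length then x else m

theorem pvSmax_eq_m2 (t : List (String × List String)) (x : String × List String) :
    List.foldl pvSmax (x.1, (x.2.length : Int)) t
      = ((List.foldl pvM2 x t).1, ((List.foldl pvM2 x t).2.length : Int)) := by
  induction t generalizing x with
  | nil => rfl
  | cons y t ih =>
      simp only [List.foldl_cons]
      rw [show pvSmax (x.1, (x.2.length : Int)) y = ((pvM2 x y).1, ((pvM2 x y).2.length : Int)) from ?_, ih]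
      simp only [pvSmax, pvM2]
      by_cases h : x.2.length < y.2.length
      · rw [if_pos h, if_pos (by exact_mod_cast h)]
      · rw [if_neg h, if_neg (by exact_mod_cast h)]

def pvMStep (acc : Option (String × List String)) (y : String × List String) : Option (String × List String) :=
  match acc with
  | none => some y
  | some m => if m.2.length < y.2.length then some y else some m

theorem pvMaxq_eq_mstep (xs : List (String × List String)) :
    PySem.List.max? xs (fun kv => kv.2.length) = List.foldl pvMStep none xs := by
  unfold PySem.List.max?
  congr 1
  funext acc y
  cases acc <;> rfl

theorem pvMStep_some (t : List (String × List String)) (x : String × List String) :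
    List.foldl pvMStep (some x) t = some (List.foldl pvM2 x t) := by
  induction t generalizing x with
  | nil => rfl
  | cons y t ih =>
      simp only [List.foldl_cons, pvMStep, pvM2]
      rw [← ih]
      by_cases h : x.2.length < y.2.length
      · simp [h]
      · simp [h]

theorem pvMaxq_eq_foldl (t : List (String × List String)) (x : String × List String) :
    PySem.List.max? (x :: t) (fun kv => kv.2.length) = some (List.foldl pvM2 x t) := by
  rw [pvMaxq_eq_mstep]
  simpa [pvMStep] using pvMStep_some t x

theorem pvSmax_preserve (t : List (String × List String)) (x : String × Int)
    (h0 : pvLm x.1 = false) (ht : ∀ kv ∈ t, pvLm kv.1 = false) :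
    pvLm (List.foldl pvSmax x t).1 = false := by
  induction t generalizing x with
  | nil => exact h0
  | cons y t ih =>
      simp only [List.foldl_cons]
      apply ih
      · simp only [pvSmax]
        split
        · exact ht y (by simp)
        · exact h0
      · intro kv hkv; exact ht kv (by simp [hkv])

theorem pvFold_nonlm (t : List (String × List String)) (b : String) (c : Int)
    (hb : pvLm b = false) (ht : ∀ kv ∈ t, pvLm kv.1 = false) :
    List.foldl pvStepA (some b, c) t
      = (some (List.foldl pvSmax (b, c) t).1, (List.foldl pvSmax (b, c) t).2) := by
  induction t generalizing b c with
  | nil => rfl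
  | cons y t ih =>
      have hy : pvLm y.1 = false := ht y (by simp)
      simp only [List.foldl_cons]
      have hstep : pvStepA (some b, c) y = (some (pvSmax (b, c) y).1, (pvSmax (b, c) y).2) := by
        simp only [pvStepA, pvSmax, hy, pvLmOpt, pvTruthy, hb]
        by_cases h : ((y.2.length : Int) > c)
        · simp [h]
        · simp [h]
      rw [hstep]
      have hb' : pvLm (pvSmax (b, c) y).1 = false := by
        simp only [pvSmax]; split
        · exact hy
        · exact hb
      have := ih (pvSmax (b, c) y).1 (pvSmax (b, c) y).2 hb' (fun kv hkv => ht kv (by simp [hkv]))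
      simpa using this

theorem pvFold_lm (t : List (String × List String)) (b : String) (c : Int)
    (hb : pvLm b = true) :
    List.foldl pvStepA (some b, c) t
      = (some (List.foldl pvSmax (b, c) (t.filter (fun kv => pvLm kv.1))).1,
         (List.foldl pvSmax (b, c) (t.filter (fun kv => pvLm kv.1))).2) := by
  induction t generalizing b c with
  | nil => rfl
  | cons y t ih =>
      by_cases hy : pvLm y.1 = true
      · rw [show List.filter (fun kv => pvLm kv.1) (y :: t) = y :: List.filter (fun kv => pvLm kv.1) t from by simp [hy]]
        simp only [List.foldl_cons]
        have hstep : pvStepA (some b, c) y = (some (pvSmax (b, c) y).1, (pvSmax (b, c) y).2) := by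
          simp only [pvStepA, pvSmax, hy, pvLmOpt, hb]
          by_cases h : ((y.2.length : Int) > c)
          · simp [h]
          · simp [h]
        rw [hstep]
        have hb' : pvLm (pvSmax (b, c) y).1 = true := by
          simp only [pvSmax]; split
          · exact hy
          · exact hb
        have := ih (pvSmax (b, c) y).1 (pvSmax (b, c) y).2 hb'
        simpa using this
      · have hy' : pvLm y.1 = false := by simpa using hy
        rw [show List.filter (fun kv => pvLm kv.1) (y :: t) = List.filter (fun kv => pvLm kv.1) t from by simp [hy']]
        simp only [List.foldl_cons]
        have hstep : pvStepA (some b, c) y = (some b, c) := by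
          simp [pvStepA, hy', pvLmOpt, hb]
        rw [hstep]
        exact ih b c hb

theorem pvSmax_argmax (t : List (String × List String)) (x : String × List String) :
    ∃ i < (x :: t).length,
      List.foldl pvSmax (x.1, (x.2.length : Int)) t
        = (((x :: t).getD i pvD0).1, ((((x :: t).getD i pvD0).2.length : Int))) ∧
      (∀ j < i, ((x :: t).getD j pvD0).2.length < ((x :: t).getD i pvD0).2.length) ∧
      (∀ j, i < j → j < (x :: t).length → ((x :: t).getD j pvD0).2.length ≤ ((x :: t).getD i pvD0).2.length) := by
  induction t generalizing x with
  | nil =>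
      refine ⟨0, by simp, by simp, ?_, ?_⟩
      · intro j hj; omega
      · intro j hj hj'; simp at hj'; omega
  | cons y t ih =>
      by_cases hxy : x.2.length < y.2.length
      · -- head replaced by y
        have hz : pvSmax (x.1, (x.2.length : Int)) y = (y.1, (y.2.length : Int)) := by
          simp only [pvSmax]; rw [if_pos (by exact_mod_cast hxy)]
        rcases ih y with ⟨i', hi'len, hi'eq, hi'lt, hi'ge⟩
        refine ⟨i' + 1, by simpa using hi'len, ?_, ?_, ?_⟩
        · simpa [hz] using hi'eq
        · intro j hj
          cases j with
          | zero =>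
              simp only [List.getD_cons_zero, List.getD_cons_succ]
              rcases Nat.eq_zero_or_pos i' with h0 | h0
              · subst h0; simpa using hxy
              · exact lt_trans hxy (by simpa using hi'lt 0 h0)
          | succ j =>
              simp only [List.getD_cons_succ]
              exact hi'lt j (by omega)
        · intro j hj hjlen
          cases j with
          | zero => omega
          | succ j =>
              simp only [List.getD_cons_succ]
              exact hi'ge j (by omega) (by simpa using hjlen)
      · -- head kept: x
        have hz : pvSmax (x.1, (x.2.length : Int)) y = (x.1, (x.2.length : Int)) := by
          simp only [pvSmax]; rw [if_neg (by exact_mod_cast hxy)]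
        rcases ih x with ⟨i', hi'len, hi'eq, hi'lt, hi'ge⟩
        rcases Nat.eq_zero_or_pos i' with h0 | h0
        · subst h0
          refine ⟨0, by simp, ?_, ?_, ?_⟩
          · simpa [hz] using hi'eq
          · intro j hj; omega
          · intro j hj hjlen
            cases j with
            | zero => omega
            | succ j =>
                cases j with
                | zero => simpa using le_of_not_gt hxy
                | succ j =>
                    simp only [List.getD_cons_zero, List.getD_cons_succ]
                    have := hi'ge (j + 1) (by omega) (by simp at hjlen ⊢; omega)
                    simpa using this
        · refine ⟨i' + 1, by simp at hi'len ⊢; omega, ?_, ?_, ?_⟩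
          · have : ((x :: y :: t).getD (i' + 1) pvD0) = ((x :: t).getD i' pvD0) := by
              cases i' with
              | zero => omega
              | succ k => simp
            rw [this]
            simpa [hz] using hi'eq
          · intro j hj
            have hx_lt : x.2.length < ((x :: t).getD i' pvD0).2.length := hi'lt 0 h0
            have hgoal : ((x :: y :: t).getD (i' + 1) pvD0) = ((x :: t).getD i' pvD0) := by
              cases i' with
              | zero => omega
              | succ k => simp
            rw [hgoal]
            cases j with
            | zero => simpa using hx_lt
            | succ j =>
                cases j with
                | zero =>
                    simp only [List.getD_cons_succ, List.getD_cons_zero]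
                    exact lt_of_le_of_lt (le_of_not_gt hxy) hx_lt
                | succ j =>
                    simp only [List.getD_cons_succ]
                    have := hi'lt (j + 1) (by omega)
                    simpa using this
          · intro j hj hjlen
            have hgoal : ((x :: y :: t).getD (i' + 1) pvD0) = ((x :: t).getD i' pvD0) := by
              cases i' with
              | zero => omega
              | succ k => simp
            rw [hgoal]
            cases j with
            | zero => omega
            | succ j =>
                cases j with
                | zero => omega
                | succ j =>
                    simp only [List.getD_cons_succ]
                    have := hi'ge (j + 1) (by omega) (by simp at hjlen ⊢; omega)
                    simpa using this

-- head of the dropWhile segment fails the predicate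
theorem pvSuf_head (l : List (String × List String)) (s0 : String × List String) (rest : List (String × List String))
    (h : pvSufSeg l = s0 :: rest) : pvLm s0.1 = true := by
  induction l with
  | nil => simp [pvSufSeg] at h
  | cons x t ih =>
      by_cases hx : pvLm x.1 = true
      · simp only [pvSufSeg, List.dropWhile_cons, hx] at h
        simp at h
        rw [← h.1]; exact hx
      · have hx' : pvLm x.1 = false := by simpa using hx
        simp only [pvSufSeg, List.dropWhile_cons, hx'] at h
        exact ih (by simpa [pvSufSeg] using h)

-- generic: the head surviving dropWhile fails the predicate
theorem pvDropHead {α : Type} (p : α → Bool) (l : List α) (x : α) (xs : List α)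
    (h : l.dropWhile p = x :: xs) : p x = false := by
  induction l with
  | nil => simp at h
  | cons a t ih =>
      by_cases ha : p a = true
      · rw [List.dropWhile_cons_of_pos ha] at h
        exact ih h
      · rw [List.dropWhile_cons_of_neg ha] at h
        cases h
        simpa using ha

theorem pvLm_empty : pvLm "" = false := by decide

theorem pvLm_ne_empty (k : String) (h : pvLm k = true) : k ≠ "" := by
  intro he
  rw [he, pvLm_empty] at h
  cases h

-- A's loop does not move off the falsy empty-string best while counts stay ≤ c
theorem pvStay (t : List (String × List String)) (c : Int)
    (ht : ∀ kv ∈ t, (kv.2.length : Int) ≤ c) :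
    t.foldl pvStepA (some "", c) = (some "", c) := by
  induction t with
  | nil => rfl
  | cons kv t ih =>
      have hle : (kv.2.length : Int) ≤ c := ht kv (by simp)
      have hnot : decide ((kv.2.length : Int) > c) = false := by
        simp only [decide_eq_false_iff_not]; omega
      have hstep : pvStepA (some "", c) kv = (some "", c) := by
        by_cases hkv : pvLm kv.1 = true
        · simp [pvStepA, hkv, pvTruthy, hnot]
        · have hkv' : pvLm kv.1 = false := by simpa using hkv
          simp [pvStepA, hkv', hnot]
      rw [List.foldl_cons, hstep]
      exact ih (fun kv hkv => ht kv (by simp [hkv]))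

theorem pvStaySmax (t : List (String × List String)) (k : String) (c : Int)
    (ht : ∀ kv ∈ t, (kv.2.length : Int) ≤ c) :
    t.foldl pvSmax (k, c) = (k, c) := by
  induction t with
  | nil => rfl
  | cons kv t ih =>
      have hle : (kv.2.length : Int) ≤ c := ht kv (by simp)
      rw [List.foldl_cons, show pvSmax (k, c) kv = (k, c) from by simp [pvSmax]; omega]
      exact ih (fun kv hkv => ht kv (by simp [hkv]))

theorem pvSmax_mem (t : List (String × List String)) :
    ∀ (k : String) (c : Int), (t.foldl pvSmax (k, c)).1 = k ∨ (t.foldl pvSmax (k, c)).1 ∈ t.map Prod.fst := by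
  induction t with
  | nil => intro k c; left; rfl
  | cons y t ih =>
      intro k c
      rw [List.foldl_cons]
      by_cases h : (y.2.length : Int) > c
      · rw [show pvSmax (k, c) y = (y.1, (y.2.length : Int)) from by simp [pvSmax, h]]
        rcases ih y.1 (y.2.length : Int) with h1 | h1
        · right; rw [h1]; simp
        · right; simp [h1]
      · rw [show pvSmax (k, c) y = (k, c) from by simp [pvSmax]; omega]
        rcases ih k c with h1 | h1
        · left; exact h1
        · right; simp [h1]

-- language_model-ness of the running best is preserved (true version)
theorem pvSmax_pres_true (t : List (String × List String)) (x : String × Int)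
    (h0 : pvLm x.1 = true) (ht : ∀ kv ∈ t, pvLm kv.1 = true) :
    pvLm (t.foldl pvSmax x).1 = true := by
  induction t generalizing x with
  | nil => exact h0
  | cons y t ih =>
      rw [List.foldl_cons]
      apply ih
      · simp only [pvSmax]
        split
        · exact ht y (by simp)
        · exact h0
      · intro kv hkv; exact ht kv (by simp [hkv])

-- the smax fold's count is the running Nat maximum
theorem pvSmax_nat (t : List (String × List String)) :
    ∀ (k : String) (c : Nat),
      (t.foldl pvSmax (k, (c : Int))).2
        = ((t.foldl (fun m kv => max m kv.2.length) c : Nat) : Int) := by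
  induction t with
  | nil => intro k c; rfl
  | cons y t ih =>
      intro k c
      rw [List.foldl_cons, List.foldl_cons]
      by_cases h : c < y.2.length
      · rw [show pvSmax (k, (c : Int)) y = (y.1, ((y.2.length : Nat) : Int)) from by
          unfold pvSmax; rw [if_pos (show ((y.2.length : Int) > (c : Int)) from by exact_mod_cast h)]]
        rw [show max c y.2.length = y.2.length from by omega]
        exact ih y.1 y.2.length
      · rw [show pvSmax (k, (c : Int)) y = (k, (c : Int)) from by
          unfold pvSmax; rw [if_neg (show ¬((y.2.length : Int) > (c : Int)) from by push_cast; omega)]]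
        rw [show max c y.2.length = c from by omega]
        exact ih k c

theorem pvSmax_bound (t : List (String × List String)) :
    ∀ (k : String) (c b : Int), c ≤ b → (∀ kv ∈ t, (kv.2.length : Int) ≤ b) →
      (t.foldl pvSmax (k, c)).2 ≤ b := by
  induction t with
  | nil => intro k c b hc _; exact hc
  | cons y t ih =>
      intro k c b hc ht
      rw [List.foldl_cons]
      by_cases h : (y.2.length : Int) > c
      · rw [show pvSmax (k, c) y = (y.1, (y.2.length : Int)) from by simp [pvSmax, h]]
        exact ih y.1 _ b (ht y (by simp)) (fun kv hkv => ht kv (by simp [hkv]))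
      · rw [show pvSmax (k, c) y = (k, c) from by simp [pvSmax]; omega]
        exact ih k c b hc (fun kv hkv => ht kv (by simp [hkv]))

-- the running Nat maximum bounds everything it saw
theorem pvNatMax_ge (t : List (String × List String)) :
    ∀ (c : Nat), c ≤ t.foldl (fun m kv => max m kv.2.length) c ∧
      ∀ kv ∈ t, kv.2.length ≤ t.foldl (fun m kv => max m kv.2.length) c := by
  induction t with
  | nil => intro c; exact ⟨le_refl c, by simp⟩
  | cons y t ih =>
      intro c
      rw [List.foldl_cons]
      rcases ih (max c y.2.length) with ⟨h1, h2⟩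
      refine ⟨le_trans (le_max_left _ _) h1, ?_⟩
      intro kv hkv
      rcases List.mem_cons.mp hkv with h | h
      · subst h; exact le_trans (le_max_right _ _) h1
      · exact h2 kv h

-- the running Nat maximum is attained (or is the seed)
theorem pvNatMax_attain (t : List (String × List String)) :
    ∀ (c : Nat), t.foldl (fun m kv => max m kv.2.length) c = c ∨
      ∃ kv ∈ t, kv.2.length = t.foldl (fun m kv => max m kv.2.length) c := by
  induction t with
  | nil => intro c; left; rfl
  | cons y t ih =>
      intro c
      rw [List.foldl_cons]
      rcases ih (max c y.2.length) with h | ⟨kv, hkv, hkv2⟩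
      · rw [h]
        by_cases hcy : y.2.length ≤ c
        · left; omega
        · right; exact ⟨y, by simp, by omega⟩
      · right; exact ⟨kv, by simp [hkv], hkv2⟩

-- two smax folds converge once an element beats both seeds
theorem pvSmax_merge (t : List (String × List String)) :
    ∀ (k1 : String) (c1 : Int) (k2 : String) (c2 : Int), c1 ≤ c2 →
      (∃ y ∈ t, (y.2.length : Int) > c2) →
      t.foldl pvSmax (k1, c1) = t.foldl pvSmax (k2, c2) := by
  induction t with
  | nil => intro _ _ _ _ _ hw; simp at hw
  | cons y t ih =>
      intro k1 c1 k2 c2 hle hw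
      rw [List.foldl_cons, List.foldl_cons]
      by_cases hy2 : (y.2.length : Int) > c2
      · rw [show pvSmax (k1, c1) y = (y.1, (y.2.length : Int)) from by simp [pvSmax]; omega,
            show pvSmax (k2, c2) y = (y.1, (y.2.length : Int)) from by simp [pvSmax, hy2]]
      · have hw' : ∃ z ∈ t, (z.2.length : Int) > c2 := by
          rcases hw with ⟨z, hz, hz2⟩
          rcases List.mem_cons.mp hz with h | h
          · subst h; omega
          · exact ⟨z, h, hz2⟩
        rw [show pvSmax (k2, c2) y = (k2, c2) from by simp [pvSmax]; omega]
        by_cases hy1 : (y.2.length : Int) > c1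
        · rw [show pvSmax (k1, c1) y = (y.1, (y.2.length : Int)) from by simp [pvSmax, hy1]]
          exact ih y.1 _ k2 c2 (by omega) hw'
        · rw [show pvSmax (k1, c1) y = (k1, c1) from by simp [pvSmax]; omega]
          exact ih k1 c1 k2 c2 hle hw'

-- a list has at most one "first maximal" position
theorem pvFM_unique (L : List (String × List String)) (i i' : Nat)
    (hi : i < L.length) (hi' : i' < L.length)
    (h1 : ∀ j < i, (L.getD j pvD0).2.length < (L.getD i pvD0).2.length)
    (h2 : ∀ j, i < j → j < L.length → (L.getD j pvD0).2.length ≤ (L.getD i pvD0).2.length)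
    (h1' : ∀ j < i', (L.getD j pvD0).2.length < (L.getD i' pvD0).2.length)
    (h2' : ∀ j, i' < j → j < L.length → (L.getD j pvD0).2.length ≤ (L.getD i' pvD0).2.length) :
    i = i' := by
  rcases lt_trichotomy i i' with h | h | h
  · have a := h1' i h
    have b := h2 i' h hi'
    omega
  · exact h
  · have a := h1 i' h
    have b := h2' i h hi
    omega


theorem pvAlt_of_pool (l pool : List (String × List String)) (names : List String)
    (x : String × List String) (rest : List (String × List String))
    (hpool : (if (l.filter (fun kv => pvLm kv.1)).isEmpty then l else l.filter (fun kv => pvLm kv.1)) = pool)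
    (hx : pool = x :: rest) :
    choose_primary_prefix_alt l names
      = (some (List.foldl pvSmax (x.1, (x.2.length : Int)) rest).1,
         some (List.foldl pvSmax (x.1, (x.2.length : Int)) rest).2) := by
  simp only [choose_primary_prefix_alt, hpool, hx, pvMaxq_eq_foldl, pvSmax_eq_m2]

-- the quirk region: A's pre-segment fold has landed on the falsy empty-string best and the first
-- language_model entry is skipped; A and B then agree or differ exactly as pvDiffTailB says
theorem pvGamma (l : List (String × List String)) (names : List String)
    (hnodup : (l.map Prod.fst).Nodup)
    (s0 : String × List String) (rest : List (String × List String))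
    (hsuf : pvSufSeg l = s0 :: rest)
    (c : Nat)
    (hPfold : (pvPreSeg l).foldl pvStepA ((none : Option String), (-1 : Int)) = (some "", (c : Int)))
    (hmem : "" ∈ (pvPreSeg l).map Prod.fst)
    (hc0 : s0.2.length ≤ c) :
    (pvDiffTailB rest s0.2.length c = true ∧ choose_primary_prefix l names ≠ choose_primary_prefix_alt l names) ∨
    (pvDiffTailB rest s0.2.length c = false ∧ choose_primary_prefix l names = choose_primary_prefix_alt l names) := by
  have hsplit : pvPreSeg l ++ pvSufSeg l = l := List.takeWhile_append_dropWhile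
  have hpreNL : ∀ kv ∈ pvPreSeg l, pvLm kv.1 = false := by
    intro kv hkv
    have := List.mem_takeWhile_imp hkv
    simpa using this
  have hs0 : pvLm s0.1 = true := pvSuf_head l s0 rest hsuf
  have hfoldsplit : l.foldl pvStepA ((none : Option String), (-1 : Int))
      = (pvSufSeg l).foldl pvStepA ((pvPreSeg l).foldl pvStepA ((none : Option String), (-1 : Int))) := by
    conv_lhs => rw [← hsplit]
    rw [List.foldl_append]
  -- B's value
  have hfilter : l.filter (fun kv => pvLm kv.1) = s0 :: rest.filter (fun kv => pvLm kv.1) := by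
    conv_lhs => rw [← hsplit]
    rw [List.filter_append, hsuf]
    rw [show (pvPreSeg l).filter (fun kv => pvLm kv.1) = [] from by
      rw [List.filter_eq_nil_iff]; intro kv hkv; simp [hpreNL kv hkv]]
    simp [hs0]
  have hB := pvAlt_of_pool l (s0 :: rest.filter (fun kv => pvLm kv.1)) names s0
    (rest.filter (fun kv => pvLm kv.1)) (by simp [hfilter]) rfl
  have hFlm : pvLm (List.foldl pvSmax (s0.1, (s0.2.length : Int)) (rest.filter (fun kv => pvLm kv.1))).1 = true :=
    pvSmax_pres_true _ (s0.1, (s0.2.length : Int)) hs0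
      (fun kv hkv => by simpa using (List.mem_filter.mp hkv).2)
  -- A skips s0
  have hskip : pvStepA (some "", (c : Int)) s0 = (some "", (c : Int)) := by
    simp only [pvStepA, hs0, if_true]
    rw [show (decide ((s0.2.length : Int) > (c : Int)) ||
        (pvTruthy (some "") && !pvLmOpt (some ""))) = false from by
      have h1 : decide ((s0.2.length : Int) > (c : Int)) = false := by
        rw [decide_eq_false_iff_not]; push_cast; omega
      simp [h1, pvTruthy]
      omega]
    simp
  have hAfold : l.foldl pvStepA ((none : Option String), (-1 : Int))
      = rest.foldl pvStepA (some "", (c : Int)) := by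
    rw [hfoldsplit, hPfold, hsuf, List.foldl_cons, hskip]
  -- split rest at the first entry with more than c layers
  have hrsplit : rest.takeWhile (fun kv => decide (kv.2.length ≤ c))
      ++ rest.dropWhile (fun kv => decide (kv.2.length ≤ c)) = rest := List.takeWhile_append_dropWhile
  have hsmall : ∀ kv ∈ rest.takeWhile (fun kv => decide (kv.2.length ≤ c)), (kv.2.length : Int) ≤ (c : Int) := by
    intro kv hkv
    have := List.mem_takeWhile_imp hkv
    simp at this
    exact_mod_cast this
  have hlmsmall : ∀ kv ∈ (rest.takeWhile (fun kv => decide (kv.2.length ≤ c))).filter (fun kv => pvLm kv.1),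
      (kv.2.length : Int) ≤ (c : Int) := by
    intro kv hkv
    exact hsmall kv (List.mem_of_mem_filter hkv)
  cases hbigc : rest.dropWhile (fun kv => decide (kv.2.length ≤ c)) with
  | nil =>
      -- A never leaves ("", c): it returns the empty prefix, B a language_model one
      have hrest_small : rest = rest.takeWhile (fun kv => decide (kv.2.length ≤ c)) := by
        conv_lhs => rw [← hrsplit]
        rw [hbigc, List.append_nil]
      have hrestle : ∀ kv ∈ rest, (kv.2.length : Int) ≤ (c : Int) := by
        intro kv hkv
        exact hsmall kv (by rw [← hrest_small]; exact hkv)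
      have hAval : choose_primary_prefix l names = (some "", some (c : Int)) := by
        simp only [choose_primary_prefix, hAfold, pvStay rest (c : Int) hrestle]
      left
      constructor
      · simp [pvDiffTailB, hbigc]
      · rw [hAval, hB]
        intro h
        have h1 := congrArg Prod.fst h
        simp at h1
        exact pvLm_ne_empty _ hFlm h1
  | cons rj tail =>
      have hrjgt : (c : Int) < (rj.2.length : Int) := by
        have := pvDropHead _ rest rj tail hbigc
        simp at this
        exact_mod_cast this
      have hAfold2 : rest.foldl pvStepA (some "", (c : Int))
          = (rj :: tail).foldl pvStepA (some "", (c : Int)) := by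
        conv_lhs => rw [← hrsplit]
        rw [hbigc, List.foldl_append, pvStay _ (c : Int) hsmall]
      -- B's fold reaches the head of the big segment with count ≤ c
      have hKBle : (List.foldl pvSmax (s0.1, (s0.2.length : Int))
          ((rest.takeWhile (fun kv => decide (kv.2.length ≤ c))).filter (fun kv => pvLm kv.1))).2 ≤ (c : Int) :=
        pvSmax_bound _ _ _ _ (by exact_mod_cast hc0) hlmsmall
      by_cases hrjlm : pvLm rj.1 = true
      · -- A recovers at rj: both are the first-maximal language_model entry from rj on
        right
        have hadopt : pvStepA (some "", (c : Int)) rj = (some rj.1, (rj.2.length : Int)) := by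
          simp only [pvStepA, hrjlm, if_true]
          rw [show (decide ((rj.2.length : Int) > (c : Int)) ||
              (pvTruthy (some "") && !pvLmOpt (some ""))) = true from by
            rw [show decide ((rj.2.length : Int) > (c : Int)) = true from by
              rw [decide_eq_true_eq]; omega]
            simp]
          simp
        have hA : l.foldl pvStepA ((none : Option String), (-1 : Int))
            = (some (List.foldl pvSmax (rj.1, (rj.2.length : Int)) (tail.filter (fun kv => pvLm kv.1))).1,
               (List.foldl pvSmax (rj.1, (rj.2.length : Int)) (tail.filter (fun kv => pvLm kv.1))).2) := by
          rw [hAfold, hAfold2, List.foldl_cons, hadopt]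
          exact pvFold_lm tail rj.1 (rj.2.length : Int) hrjlm
        have hfiltrest : rest.filter (fun kv => pvLm kv.1)
            = (rest.takeWhile (fun kv => decide (kv.2.length ≤ c))).filter (fun kv => pvLm kv.1)
              ++ rj :: tail.filter (fun kv => pvLm kv.1) := by
          conv_lhs => rw [← hrsplit]
          rw [List.filter_append, hbigc]
          simp [hrjlm]
        have hFeq : List.foldl pvSmax (s0.1, (s0.2.length : Int)) (rest.filter (fun kv => pvLm kv.1))
            = List.foldl pvSmax (rj.1, (rj.2.length : Int)) (tail.filter (fun kv => pvLm kv.1)) := by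
          rw [hfiltrest, List.foldl_append, List.foldl_cons]
          congr 1
          rw [pvSmax_def, if_pos (by omega)]
        constructor
        · simp [pvDiffTailB, hbigc, pvLmN_eq, hrjlm]
        · simp only [choose_primary_prefix, hA, hB, hFeq]
      · -- rj is an ordinary prefix with more layers: A adopts it and forgets the preference
        have hrjlm' : pvLm rj.1 = false := by simpa using hrjlm
        have hadopt : pvStepA (some "", (c : Int)) rj = (some rj.1, (rj.2.length : Int)) := by
          simp only [pvStepA, hrjlm', if_false, Bool.false_eq_true]
          rw [show ((some "" : Option String).isNone ||
              (decide ((rj.2.length : Int) > (c : Int)) && !pvLmOpt (some ""))) = true from by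
            have : pvLmOpt (some "") = false := pvLm_empty
            simp [this, decide_eq_true_eq]; omega]
          simp
        have htsplit : tail.takeWhile (fun kv => !pvLm kv.1) ++ tail.dropWhile (fun kv => !pvLm kv.1) = tail :=
          List.takeWhile_append_dropWhile
        have htpre : ∀ kv ∈ tail.takeWhile (fun kv => !pvLm kv.1), pvLm kv.1 = false := by
          intro kv hkv
          have := List.mem_takeWhile_imp hkv
          simpa using this
        have hksegbr : tail.dropWhile (fun kv => !pvLmN kv) = tail.dropWhile (fun kv => !pvLm kv.1) := by
          congr 1
          funext kv
          rw [pvLmN_eq]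
        cases hksegc : tail.dropWhile (fun kv => !pvLm kv.1) with
        | nil =>
            -- no language_model entry ever again: A ends on a non-language_model prefix
            left
            have htailnl : ∀ kv ∈ tail, pvLm kv.1 = false := by
              intro kv hkv
              apply htpre
              rw [show tail.takeWhile (fun kv => !pvLm kv.1) = tail from by
                conv_rhs => rw [← htsplit]
                rw [hksegc, List.append_nil]]
              exact hkv
            have hA : l.foldl pvStepA ((none : Option String), (-1 : Int))
                = (some (List.foldl pvSmax (rj.1, (rj.2.length : Int)) tail).1,
                   (List.foldl pvSmax (rj.1, (rj.2.length : Int)) tail).2) := by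
              rw [hAfold, hAfold2, List.foldl_cons, hadopt]
              exact pvFold_nonlm tail rj.1 (rj.2.length : Int) hrjlm' htailnl
            have hHnl : pvLm (List.foldl pvSmax (rj.1, (rj.2.length : Int)) tail).1 = false :=
              pvSmax_preserve tail (rj.1, (rj.2.length : Int)) hrjlm' htailnl
            constructor
            · simp [pvDiffTailB, hbigc, pvLmN_eq, hrjlm', hksegbr, hksegc]
            · simp only [choose_primary_prefix, hA, hB]
              intro h
              have h1 := congrArg Prod.fst h
              simp at h1
              rw [h1] at hHnl
              rw [hFlm] at hHnl
              cases hHnl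
        | cons rk t2 =>
            have hrk : pvLm rk.1 = true := by
              have := pvDropHead _ tail rk t2 hksegc
              simpa using this
            -- A runs through the non-language_model stretch to a best Q, which cannot be ""
            have hQfold := pvFold_nonlm (tail.takeWhile (fun kv => !pvLm kv.1)) rj.1 (rj.2.length : Int) hrjlm' htpre
            have hQne : (List.foldl pvSmax (rj.1, (rj.2.length : Int)) (tail.takeWhile (fun kv => !pvLm kv.1))).1 ≠ "" := by
              intro hQe
              have hQmem := pvSmax_mem (tail.takeWhile (fun kv => !pvLm kv.1)) rj.1 (rj.2.length : Int)
              have hsufmem : ("" : String) ∈ (pvSufSeg l).map Prod.fst := by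
                rw [hsuf]
                have hrjrest : rj ∈ rest := by
                  rw [← hrsplit, hbigc]
                  exact List.mem_append_right _ (by simp)
                have htprest : ∀ kv ∈ tail.takeWhile (fun kv => !pvLm kv.1), kv ∈ rest := by
                  intro kv hkv
                  rw [← hrsplit, hbigc]
                  refine List.mem_append_right _ ?_
                  refine List.mem_cons_of_mem _ ?_
                  rw [← htsplit]
                  exact List.mem_append_left _ hkv
                rcases hQmem with h | h
                · rw [hQe] at h
                  rw [show ("" : String) = rj.1 from h]
                  simp only [List.map_cons]
                  exact List.mem_cons_of_mem _ (List.mem_map_of_mem hrjrest)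
                · rw [hQe] at h
                  rcases List.mem_map.mp h with ⟨kv, hkv, hkv1⟩
                  simp only [List.map_cons]
                  exact List.mem_cons_of_mem _ (List.mem_map.mpr ⟨kv, htprest kv hkv, hkv1⟩)
              have hdisj : List.Disjoint ((pvPreSeg l).map Prod.fst) ((pvSufSeg l).map Prod.fst) := by
                apply List.disjoint_of_nodup_append
                rw [← List.map_append, hsplit]
                exact hnodup
              exact hdisj hmem hsufmem
            have hQnl : pvLm (List.foldl pvSmax (rj.1, (rj.2.length : Int)) (tail.takeWhile (fun kv => !pvLm kv.1))).1 = false :=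
              pvSmax_preserve _ (rj.1, (rj.2.length : Int)) hrjlm' htpre
            have hadopt2 : pvStepA
                (some (List.foldl pvSmax (rj.1, (rj.2.length : Int)) (tail.takeWhile (fun kv => !pvLm kv.1))).1,
                 (List.foldl pvSmax (rj.1, (rj.2.length : Int)) (tail.takeWhile (fun kv => !pvLm kv.1))).2) rk
                = (some rk.1, (rk.2.length : Int)) := by
              simp only [pvStepA, hrk, if_true]
              rw [show (decide ((rk.2.length : Int) > (List.foldl pvSmax (rj.1, (rj.2.length : Int)) (tail.takeWhile (fun kv => !pvLm kv.1))).2) ||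
                  (pvTruthy (some (List.foldl pvSmax (rj.1, (rj.2.length : Int)) (tail.takeWhile (fun kv => !pvLm kv.1))).1) &&
                   !pvLmOpt (some (List.foldl pvSmax (rj.1, (rj.2.length : Int)) (tail.takeWhile (fun kv => !pvLm kv.1))).1))) = true from by
                have h1 : pvTruthy (some (List.foldl pvSmax (rj.1, (rj.2.length : Int)) (tail.takeWhile (fun kv => !pvLm kv.1))).1) = true := by
                  simp [pvTruthy, hQne]
                have h2 : pvLmOpt (some (List.foldl pvSmax (rj.1, (rj.2.length : Int)) (tail.takeWhile (fun kv => !pvLm kv.1))).1) = false := hQnl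
                simp [h1, h2]]
              simp
            have hA : l.foldl pvStepA ((none : Option String), (-1 : Int))
                = (some (List.foldl pvSmax (rk.1, (rk.2.length : Int)) (t2.filter (fun kv => pvLm kv.1))).1,
                   (List.foldl pvSmax (rk.1, (rk.2.length : Int)) (t2.filter (fun kv => pvLm kv.1))).2) := by
              have htaileq : tail = tail.takeWhile (fun kv => !pvLm kv.1) ++ rk :: t2 := by
                conv_lhs => rw [← htsplit]
                rw [hksegc]
              rw [hAfold, hAfold2, List.foldl_cons, hadopt, htaileq]
              rw [List.foldl_append, hQfold, List.foldl_cons, hadopt2]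
              exact pvFold_lm t2 rk.1 (rk.2.length : Int) hrk
            -- B's filtered list splits the same way
            have hfiltrest : rest.filter (fun kv => pvLm kv.1)
                = (rest.takeWhile (fun kv => decide (kv.2.length ≤ c))).filter (fun kv => pvLm kv.1)
                  ++ rk :: t2.filter (fun kv => pvLm kv.1) := by
              conv_lhs => rw [← hrsplit]
              rw [List.filter_append, hbigc]
              congr 1
              have htaileq2 : tail = tail.takeWhile (fun kv => !pvLm kv.1) ++ rk :: t2 := by
                conv_lhs => rw [← htsplit]
                rw [hksegc]
              rw [show rj :: tail = [rj] ++ (tail.takeWhile (fun kv => !pvLm kv.1) ++ rk :: t2) from by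
                rw [← htaileq2]
                simp]
              rw [List.filter_append, List.filter_append]
              rw [show List.filter (fun kv => pvLm kv.1) [rj] = [] from by simp [hrjlm']]
              rw [show (tail.takeWhile (fun kv => !pvLm kv.1)).filter (fun kv => pvLm kv.1) = [] from by
                rw [List.filter_eq_nil_iff]; intro kv hkv; simp [htpre kv hkv]]
              simp [hrk]
            -- counts: B's best-so-far mb, A's final mp
            have hKBnat := pvSmax_nat ((rest.takeWhile (fun kv => decide (kv.2.length ≤ c))).filter (fun kv => pvLm kv.1)) s0.1 s0.2.length
            have hMnat := pvSmax_nat (t2.filter (fun kv => pvLm kv.1)) rk.1 rk.2.length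
            have hlmfilt : (fun kv : String × List String => pvLmN kv) = (fun kv => pvLm kv.1) := by
              funext kv
              rw [pvLmN_eq]
            have hdval : pvDiffTailB rest s0.2.length c
                = decide (((t2.filter (fun kv => pvLm kv.1)).foldl (fun m kv => max m kv.2.length) rk.2.length)
                    ≤ ((rest.takeWhile (fun kv => decide (kv.2.length ≤ c))).filter (fun kv => pvLm kv.1)).foldl (fun m kv => max m kv.2.length) s0.2.length) := by
              simp only [pvDiffTailB, hbigc, pvLmN_eq, hrjlm', hksegbr, hksegc, hlmfilt]
              simp
            set KB := List.foldl pvSmax (s0.1, (s0.2.length : Int))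
              ((rest.takeWhile (fun kv => decide (kv.2.length ≤ c))).filter (fun kv => pvLm kv.1)) with hKBdef
            set M := List.foldl pvSmax (rk.1, (rk.2.length : Int)) (t2.filter (fun kv => pvLm kv.1)) with hMdef
            have hFsplit : List.foldl pvSmax (s0.1, (s0.2.length : Int)) (rest.filter (fun kv => pvLm kv.1))
                = List.foldl pvSmax KB (rk :: t2.filter (fun kv => pvLm kv.1)) := by
              rw [hfiltrest, List.foldl_append]
            by_cases hmp : ((t2.filter (fun kv => pvLm kv.1)).foldl (fun m kv => max m kv.2.length) rk.2.length)
                ≤ ((rest.takeWhile (fun kv => decide (kv.2.length ≤ c))).filter (fun kv => pvLm kv.1)).foldl (fun m kv => max m kv.2.length) s0.2.length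
            · -- A's recovered choice is no better: B keeps an earlier language_model entry; they differ
              left
              have hFstay : List.foldl pvSmax KB (rk :: t2.filter (fun kv => pvLm kv.1)) = KB := by
                have hKB2 : KB.2 = (((((rest.takeWhile (fun kv => decide (kv.2.length ≤ c))).filter (fun kv => pvLm kv.1)).foldl (fun m kv => max m kv.2.length) s0.2.length) : Nat) : Int) := hKBnat
                rw [show KB = (KB.1, KB.2) from rfl]
                apply pvStaySmax
                intro kv hkv
                rw [hKB2]
                rcases List.mem_cons.mp hkv with h | h
                · rw [h]
                  have := (pvNatMax_ge (t2.filter (fun kv => pvLm kv.1)) rk.2.length).1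
                  push_cast
                  omega
                · have := (pvNatMax_ge (t2.filter (fun kv => pvLm kv.1)) rk.2.length).2 kv h
                  push_cast
                  omega
              have hMkey : M.1 = rk.1 ∨ M.1 ∈ (t2.filter (fun kv => pvLm kv.1)).map Prod.fst :=
                pvSmax_mem _ rk.1 (rk.2.length : Int)
              have hKBkey : KB.1 = s0.1 ∨ KB.1 ∈ ((rest.takeWhile (fun kv => decide (kv.2.length ≤ c))).filter (fun kv => pvLm kv.1)).map Prod.fst :=
                pvSmax_mem _ s0.1 (s0.2.length : Int)
              have hkeysne : M.1 ≠ KB.1 := by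
                have hldecomp : l = (pvPreSeg l ++ s0 :: rest.takeWhile (fun kv => decide (kv.2.length ≤ c)))
                    ++ (rj :: (tail.takeWhile (fun kv => !pvLm kv.1) ++ rk :: t2)) := by
                  conv_lhs => rw [← hsplit]
                  rw [hsuf]
                  conv_lhs => rw [show rest = rest.takeWhile (fun kv => decide (kv.2.length ≤ c)) ++ rj :: tail from by
                    conv_lhs => rw [← hrsplit]
                    rw [hbigc]]
                  conv_lhs => rw [show tail = tail.takeWhile (fun kv => !pvLm kv.1) ++ rk :: t2 from by
                    conv_lhs => rw [← htsplit]
                    rw [hksegc]]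
                  simp
                have hnd2 : ((pvPreSeg l ++ s0 :: rest.takeWhile (fun kv => decide (kv.2.length ≤ c))).map Prod.fst
                    ++ (rj :: (tail.takeWhile (fun kv => !pvLm kv.1) ++ rk :: t2)).map Prod.fst).Nodup := by
                  rw [← List.map_append, ← hldecomp]
                  exact hnodup
                have hdisj : List.Disjoint
                    ((pvPreSeg l ++ s0 :: rest.takeWhile (fun kv => decide (kv.2.length ≤ c))).map Prod.fst)
                    ((rj :: (tail.takeWhile (fun kv => !pvLm kv.1) ++ rk :: t2)).map Prod.fst) :=
                  List.disjoint_of_nodup_append hnd2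
                intro he
                have hMin : M.1 ∈ (rj :: (tail.takeWhile (fun kv => !pvLm kv.1) ++ rk :: t2)).map Prod.fst := by
                  rcases hMkey with h | h
                  · rw [h]
                    simp
                  · rcases List.mem_map.mp h with ⟨kv, hkv, hkv1⟩
                    have : kv ∈ rk :: t2 := List.mem_cons_of_mem _ (List.mem_of_mem_filter hkv)
                    exact List.mem_map.mpr ⟨kv, by simp [List.mem_cons.mp this], hkv1⟩
                have hKBin : KB.1 ∈ (pvPreSeg l ++ s0 :: rest.takeWhile (fun kv => decide (kv.2.length ≤ c))).map Prod.fst := by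
                  rcases hKBkey with h | h
                  · rw [h]
                    simp
                  · rcases List.mem_map.mp h with ⟨kv, hkv, hkv1⟩
                    have : kv ∈ rest.takeWhile (fun kv => decide (kv.2.length ≤ c)) := List.mem_of_mem_filter hkv
                    exact List.mem_map.mpr ⟨kv, by simp [this], hkv1⟩
                rw [← he] at hKBin
                exact hdisj hKBin hMin
              constructor
              · rw [hdval]
                simpa using hmp
              · simp only [choose_primary_prefix, hA, hB, hFsplit, hFstay]
                intro h
                have h1 := congrArg Prod.fst h
                simp at h1
                exact hkeysne h1
            · -- a strictly better language_model entry follows: both land on it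
              right
              have hmp' := lt_of_not_ge hmp
              have hFeq : List.foldl pvSmax KB (rk :: t2.filter (fun kv => pvLm kv.1)) = M := by
                have hKB2 : KB.2 = (((((rest.takeWhile (fun kv => decide (kv.2.length ≤ c))).filter (fun kv => pvLm kv.1)).foldl (fun m kv => max m kv.2.length) s0.2.length) : Nat) : Int) := hKBnat
                by_cases hcb : KB.2 < (rk.2.length : Int)
                · rw [List.foldl_cons, show pvSmax KB rk = (rk.1, (rk.2.length : Int)) from by
                    rw [show KB = (KB.1, KB.2) from rfl]
                    unfold pvSmax
                    rw [if_pos (by simpa using hcb)]]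
                · rw [List.foldl_cons, show pvSmax KB rk = (KB.1, KB.2) from by
                    rw [show KB = (KB.1, KB.2) from rfl]
                    unfold pvSmax
                    rw [if_neg (by simpa using hcb)]]
                  rw [hMdef]
                  symm
                  apply pvSmax_merge
                  · rw [hKB2]
                    push_cast
                    omega
                  · rcases pvNatMax_attain (t2.filter (fun kv => pvLm kv.1)) rk.2.length with h | ⟨kv, hkv, hkv2⟩
                    · exfalso
                      rw [h] at hmp'
                      rw [hKB2] at hcb
                      push_cast at hcb
                      omega
                    · refine ⟨kv, hkv, ?_⟩
                      rw [hKB2, hkv2]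
                      push_cast
                      omega
              constructor
              · rw [hdval]
                simpa using hmp
              · simp only [choose_primary_prefix, hA, hB, hFsplit, hFeq]
-- ===== VERDICT =====
theorem choose_primary_prefix_spec : Claim_unchanged_choose_primary_prefix := by
  intro l names _dom hnodup hD
  have hsplit : pvPreSeg l ++ pvSufSeg l = l := List.takeWhile_append_dropWhile
  have hpre : ∀ kv ∈ pvPreSeg l, pvLm kv.1 = false := by
    intro kv hkv
    have := List.mem_takeWhile_imp hkv
    simpa using this
  have hfoldsplit : l.foldl pvStepA ((none : Option String), (-1 : Int))
      = (pvSufSeg l).foldl pvStepA ((pvPreSeg l).foldl pvStepA ((none : Option String), (-1 : Int))) := by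
    conv_lhs => rw [← hsplit]
    rw [List.foldl_append]
  cases hsuf : pvSufSeg l with
  | nil =>
      -- no language_model prefix at all
      have hl : pvPreSeg l = l := by rw [hsuf, List.append_nil] at hsplit; exact hsplit
      have hallnl : ∀ kv ∈ l, pvLm kv.1 = false := by
        intro kv hkv; exact hpre kv (by rw [hl]; exact hkv)
      have hfilter : l.filter (fun kv => pvLm kv.1) = [] := by
        rw [List.filter_eq_nil_iff]; intro kv hkv; simp [hallnl kv hkv]
      cases l with
      | nil => rfl
      | cons x tl =>
          have hx : pvLm x.1 = false := hallnl x (by simp)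
          have hstep0 : pvStepA ((none : Option String), (-1 : Int)) x = (some x.1, (x.2.length : Int)) := by
            simp [pvStepA, hx]
          have hA : (x :: tl).foldl pvStepA ((none : Option String), (-1 : Int))
              = (some (List.foldl pvSmax (x.1, (x.2.length : Int)) tl).1,
                 (List.foldl pvSmax (x.1, (x.2.length : Int)) tl).2) := by
            rw [List.foldl_cons, hstep0]
            exact pvFold_nonlm tl x.1 (x.2.length : Int) hx (fun kv hkv => hallnl kv (by simp [hkv]))
          have hB := pvAlt_of_pool (x :: tl) (x :: tl) names x tl (by simp [hfilter]) rfl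
          simp only [choose_primary_prefix, hA, hB]
  | cons s0 rest =>
      have hs0 : pvLm s0.1 = true := pvSuf_head l s0 rest hsuf
      have hfilter : l.filter (fun kv => pvLm kv.1) = s0 :: rest.filter (fun kv => pvLm kv.1) := by
        conv_lhs => rw [← hsplit]
        rw [List.filter_append, hsuf]
        rw [show (pvPreSeg l).filter (fun kv => pvLm kv.1) = [] from by
          rw [List.filter_eq_nil_iff]; intro kv hkv; simp [hpre kv hkv]]
        simp [hs0]
      have hB := pvAlt_of_pool l (s0 :: rest.filter (fun kv => pvLm kv.1)) names s0
        (rest.filter (fun kv => pvLm kv.1)) (by simp [hfilter]) rfl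
      have hAfromLm :
          ((pvSufSeg l).foldl pvStepA ((pvPreSeg l).foldl pvStepA ((none : Option String), (-1 : Int)))
            = (some (List.foldl pvSmax (s0.1, (s0.2.length : Int)) (rest.filter (fun kv => pvLm kv.1))).1,
               (List.foldl pvSmax (s0.1, (s0.2.length : Int)) (rest.filter (fun kv => pvLm kv.1))).2)) →
          choose_primary_prefix l names = choose_primary_prefix_alt l names := by
        intro hfold
        simp only [choose_primary_prefix, hfoldsplit, hfold, hB]
      cases hpreseg : pvPreSeg l with
      | nil =>
          apply hAfromLm
          rw [hsuf, hpreseg]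
          simp only [List.foldl_nil, List.foldl_cons]
          rw [show pvStepA ((none : Option String), (-1 : Int)) s0 = (some s0.1, (s0.2.length : Int)) from by
            simp [pvStepA, hs0]
            omega]
          exact pvFold_lm rest s0.1 (s0.2.length : Int) hs0
      | cons p0 pt =>
          have hp0 : pvLm p0.1 = false := hpre p0 (by rw [hpreseg]; simp)
          have hpt : ∀ kv ∈ pt, pvLm kv.1 = false := fun kv hkv => hpre kv (by rw [hpreseg]; simp [hkv])
          have hstep0 : pvStepA ((none : Option String), (-1 : Int)) p0 = (some p0.1, (p0.2.length : Int)) := by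
            simp [pvStepA, hp0]
          have hApre : (pvPreSeg l).foldl pvStepA ((none : Option String), (-1 : Int))
              = (some (List.foldl pvSmax (p0.1, (p0.2.length : Int)) pt).1,
                 (List.foldl pvSmax (p0.1, (p0.2.length : Int)) pt).2) := by
            rw [hpreseg, List.foldl_cons, hstep0]
            exact pvFold_nonlm pt p0.1 (p0.2.length : Int) hp0 hpt
          set P := List.foldl pvSmax (p0.1, (p0.2.length : Int)) pt with hP
          have hPnl : pvLm P.1 = false := pvSmax_preserve pt (p0.1, (p0.2.length : Int)) hp0 hpt
          by_cases hg : P.1 = "" ∧ (s0.2.length : Int) ≤ P.2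
          · -- the quirk region: defer to pvGamma; a difference here is exactly D_
            obtain ⟨hP1, hc0i⟩ := hg
            have hP2nat : P.2 = ((pt.foldl (fun m kv => max m kv.2.length) p0.2.length : Nat) : Int) :=
              pvSmax_nat pt p0.1 p0.2.length
            have hPfold : (pvPreSeg l).foldl pvStepA ((none : Option String), (-1 : Int))
                = (some "", ((pt.foldl (fun m kv => max m kv.2.length) p0.2.length : Nat) : Int)) := by
              rw [hApre, hP1, hP2nat]
            have hmem : "" ∈ (pvPreSeg l).map Prod.fst := by
              rcases pvSmax_mem pt p0.1 (p0.2.length : Int) with h | h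
              · rw [hpreseg]
                rw [← hP, hP1] at h
                simp only [List.map_cons]
                rw [← h]
                exact List.mem_cons_self
              · rw [hpreseg]
                rw [← hP, hP1] at h
                simp only [List.map_cons]
                exact List.mem_cons_of_mem _ h
            have hc0 : s0.2.length ≤ pt.foldl (fun m kv => max m kv.2.length) p0.2.length := by
              rw [hP2nat] at hc0i
              exact_mod_cast hc0i
            rcases pvGamma l names hnodup s0 rest hsuf _ hPfold hmem hc0 with ⟨hdt, hne⟩ | ⟨_, heq⟩
            · exfalso
              apply hD
              unfold D_choose_primary_prefix
              rw [pvDSeg_eq, pvDSuf_eq, hsuf, hpreseg]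
              rcases pvSmax_argmax pt p0 with ⟨i, hilen, hieq, hilt, hige⟩
              have hkey : ((p0 :: pt).getD i pvD0).1 = "" := by
                have := congrArg Prod.fst hieq
                simp only [← hP] at this
                rw [hP1] at this
                exact this.symm
              have hclen : ((p0 :: pt).getD i pvD0).2.length = pt.foldl (fun m kv => max m kv.2.length) p0.2.length := by
                have := congrArg Prod.snd hieq
                simp only [← hP] at this
                rw [hP2nat] at this
                exact_mod_cast this.symm
              refine ⟨by simp, i, List.mem_range.mpr hilen, hkey, ?_, ?_, ?_⟩
              · intro j hj
                exact ⟨fun h => hilt j h, fun h => hige j h (List.mem_range.mp hj)⟩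
              · rw [hclen]
                exact hc0
              · rw [hclen]
                exact hdt
            · exact heq
          · -- A adopts the first language_model prefix: no difference
            have hcond : (decide ((s0.2.length : Int) > P.2) || (pvTruthy (some P.1) && !pvLmOpt (some P.1))) = true := by
              by_cases hgt : ((s0.2.length : Int) > P.2)
              · simp [hgt]
              · have hPne : P.1 ≠ "" := by
                  intro h
                  exact hg ⟨h, by omega⟩
                simp [pvTruthy, pvLmOpt, hPnl, hPne]
            apply hAfromLm
            rw [hsuf]
            rw [List.foldl_cons, hApre]
            rw [show pvStepA (some P.1, P.2) s0 = (some s0.1, (s0.2.length : Int)) from by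
              simp only [pvStepA, hs0, if_true]
              rw [hcond]
              simp]
            exact pvFold_lm rest s0.1 (s0.2.length : Int) hs0

theorem choose_primary_prefix_changed : Claim_changed_choose_primary_prefix := by
  unfold Claim_changed_choose_primary_prefix; decide

theorem choose_primary_prefix_tight : Claim_exact_choose_primary_prefix := by
  intro l names _dom hnodup hD
  unfold D_choose_primary_prefix at hD
  rw [pvDSeg_eq, pvDSuf_eq] at hD
  obtain ⟨hne, i, hirange, hkey, hprops, hc0d, hdiff⟩ := hD
  cases hsuf : pvSufSeg l with
  | nil => rw [hsuf] at hne; exact absurd rfl hne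
  | cons s0 rest =>
      cases hpreseg : pvPreSeg l with
      | nil =>
          rw [hpreseg] at hirange
          simp at hirange
      | cons p0 pt =>
          rw [hpreseg] at hirange hkey hprops hc0d hdiff
          rw [hsuf] at hc0d hdiff
          simp only [List.headD_cons, List.tail_cons] at hc0d hdiff
          have hi : i < (p0 :: pt).length := List.mem_range.mp hirange
          have hsplit : pvPreSeg l ++ pvSufSeg l = l := List.takeWhile_append_dropWhile
          have hpre : ∀ kv ∈ pvPreSeg l, pvLm kv.1 = false := by
            intro kv hkv
            have := List.mem_takeWhile_imp hkv
            simpa using this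
          have hp0 : pvLm p0.1 = false := hpre p0 (by rw [hpreseg]; simp)
          have hpt : ∀ kv ∈ pt, pvLm kv.1 = false := fun kv hkv => hpre kv (by rw [hpreseg]; simp [hkv])
          have hstep0 : pvStepA ((none : Option String), (-1 : Int)) p0 = (some p0.1, (p0.2.length : Int)) := by
            simp [pvStepA, hp0]
          have hApre : (pvPreSeg l).foldl pvStepA ((none : Option String), (-1 : Int))
              = (some (List.foldl pvSmax (p0.1, (p0.2.length : Int)) pt).1,
                 (List.foldl pvSmax (p0.1, (p0.2.length : Int)) pt).2) := by
            rw [hpreseg, List.foldl_cons, hstep0]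
            exact pvFold_nonlm pt p0.1 (p0.2.length : Int) hp0 hpt
          rcases pvSmax_argmax pt p0 with ⟨i', hilen', hieq', hilt', hige'⟩
          have hii : i = i' := by
            apply pvFM_unique (p0 :: pt) i i' hi hilen'
            · intro j hj
              exact (hprops j (List.mem_range.mpr (by omega))).1 hj
            · intro j hj hjlen
              exact (hprops j (List.mem_range.mpr hjlen)).2 hj
            · exact hilt'
            · exact hige'
          subst hii
          have hPfold : (pvPreSeg l).foldl pvStepA ((none : Option String), (-1 : Int))
              = (some "", (((p0 :: pt).getD i pvD0).2.length : Int)) := by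
            rw [hApre, hieq', hkey]
          have hmem : "" ∈ (pvPreSeg l).map Prod.fst := by
            rw [hpreseg]
            have hgm : (p0 :: pt).getD i pvD0 ∈ (p0 :: pt) := by
              rw [List.getD_eq_getElem _ _ hi]
              exact List.getElem_mem _
            rw [← hkey]
            exact List.mem_map_of_mem hgm
          rcases pvGamma l names hnodup s0 rest hsuf _ hPfold hmem hc0d with ⟨_, hneq⟩ | ⟨hdf, _⟩
          · exact hneq
          · rw [hdiff] at hdf
            cases hdf
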